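-- pv_equiv track=rewrite | github.com/olsenw/LeetCodeExercises | Python3/count_number_of_distinct_integers_after_reverse_operations.py | countDistinctIntegers_oops
-- ===== SOURCE A (Python) =====
-- from typing import List, Dict, Set, Optional
--
-- def countDistinctIntegers_oops(nums: List[int]) -> int:
--     # this is incorrect... math error
--     def reverse(i:int) -> int:
--         a = 0
--         while i:
--             a += i % 10
--             i //= 10
--         return a
--     many = set()
--     once = set()
--     def account(nums:List[int]) -> None:
--         for n in nums:
--             if n in many:
--                 continue
--             elif n in once:
--                 many.add(n)
--                 once.remove(n)
--             else:
--                 once.add(n)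
--     account(nums)
--     account([reverse(n) for n in once])
--     return len(once)
-- ===== SOURCE B (Python) =====
-- def _digitsum(n: int) -> int:
--     # same (mis-named) digit-sum operation as A's inner `reverse`
--     return 0 if n == 0 else n % 10 + _digitsum(n // 10)
--
-- def countDistinctIntegers_oops(nums):
--     cnt = {}
--     for n in nums:
--         cnt[n] = cnt.get(n, 0) + 1
--     once = [n for n in cnt if cnt[n] == 1]
--     L = [_digitsum(n) for n in once]
--     rc = {}
--     for r in L:
--         rc[r] = rc.get(r, 0) + 1
--     stay = sum(1 for n in once if rc.get(n, 0) == 0)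
--     new = sum(1 for r in rc if rc[r] == 1 and r not in cnt)
--     return stay + new
-- ===== Notes on version B (the rewrite author's own statement) =====
-- stated objective: alternative
-- what changed: Replaces A's mutable once/many two-pass state machine (second pass re-running the membership automaton over digit-sums) with a direct derivation from count tables: a counter of nums, the count-1 list, a counter of its digit-sums, and two closed-form counts (survivors with digit-sum multiplicity 0, plus fresh digit-sums of multiplicity 1).
import Mathlib
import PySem

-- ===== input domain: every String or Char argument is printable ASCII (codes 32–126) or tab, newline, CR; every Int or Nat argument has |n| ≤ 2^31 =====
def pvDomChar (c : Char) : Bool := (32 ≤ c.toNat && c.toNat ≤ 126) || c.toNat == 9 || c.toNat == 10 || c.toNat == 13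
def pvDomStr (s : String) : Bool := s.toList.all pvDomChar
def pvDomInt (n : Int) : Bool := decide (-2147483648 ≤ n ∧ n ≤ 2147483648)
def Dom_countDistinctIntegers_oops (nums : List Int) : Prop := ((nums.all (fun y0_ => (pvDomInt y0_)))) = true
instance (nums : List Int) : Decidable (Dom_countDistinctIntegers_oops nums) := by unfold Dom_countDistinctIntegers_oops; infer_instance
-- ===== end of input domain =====

-- B replaces A's mutable once/many two-pass state machine by a direct derivation from
-- count tables (counter of nums, counter of the digit-sums of the count-1 values);
-- objective: alternative (same O(n) cost, different algorithm).


-- ===== PORT A =====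
-- A's inner `reverse`: while-loop accumulator of digit sums (Python // and %).
-- For i < 0 Python's loop never terminates (i //= 10 has fixpoint -1, so Python A
-- returns no value there); the total Lean completion returns 0 on that branch.
def pyReverse (i : Int) (a : Int) : Int :=
  if i = 0 then a
  else if i < 0 then 0
  else pyReverse (PySem.Int.floordiv i 10) (a + PySem.Int.mod i 10)
termination_by i.toNat
decreasing_by
  have hdiv : PySem.Int.floordiv i 10 = i / 10 := Int.fdiv_eq_ediv_of_nonneg _ (by norm_num)
  rw [hdiv]; omega

-- one iteration of A's `account` loop body; state = (many, once)
def accountStep (st : PySem.Set Int × PySem.Set Int) (n : Int) :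
    PySem.Set Int × PySem.Set Int :=
  if PySem.Set.contains st.1 n then st
  else if PySem.Set.contains st.2 n then (PySem.Set.add st.1 n, PySem.Set.discard st.2 n)
  else (st.1, PySem.Set.add st.2 n)

def countDistinctIntegers_oops (nums : List Int) : Int :=
  let st1 := nums.foldl accountStep (PySem.Set.empty, PySem.Set.empty)
  let st2 := (st1.2.map (fun n => pyReverse n 0)).foldl accountStep st1
  PySem.Set.len st2.2

-- ===== PORT B =====
-- Source B's `_digitsum` (direct recursion); for n < 0 the Python recursion never reaches 0
-- (no value returned); the total Lean completion returns 0 on that branch.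
def digitsumB (n : Int) : Int :=
  if n = 0 then 0
  else if n < 0 then 0
  else PySem.Int.mod n 10 + digitsumB (PySem.Int.floordiv n 10)
termination_by n.toNat
decreasing_by
  have hdiv : PySem.Int.floordiv n 10 = n / 10 := Int.fdiv_eq_ediv_of_nonneg _ (by norm_num)
  rw [hdiv]; omega

def countDistinctIntegers_oops_alt (nums : List Int) : Int :=
  let cnt := PySem.Dict.counter nums
  let once := cnt.keys.filter (fun n => cnt.getD n 0 == 1)
  let L := once.map digitsumB
  let rc := PySem.Dict.counter L
  let stay := (once.filter (fun n => rc.getD n 0 == 0)).length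
  let fresh := (rc.keys.filter (fun r => rc.getD r 0 == 1 && !(cnt.contains r))).length
  ((stay : Int) + (fresh : Int))

-- ===== PRECONDITION & SPEC =====
-- No Pre_: the ports are total and equal on every input. (On a list containing a
-- negative value of count 1 both Pythons fail to return — A's `reverse` loop diverges,
-- B's recursion overflows — and both ports return the same total completion there.)
def Spec_countDistinctIntegers_oops (nums : List Int) (out : Int) : Prop :=
  out = countDistinctIntegers_oops_alt nums
instance (nums : List Int) (out : Int) : Decidable (Spec_countDistinctIntegers_oops nums out) := by
  unfold Spec_countDistinctIntegers_oops; infer_instance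

-- ===== CLAIM (what is proved, stated in full; the proofs are below) =====
def Claim_equal_countDistinctIntegers_oops : Prop :=
  ∀ (nums : List Int), Dom_countDistinctIntegers_oops nums →
    Spec_countDistinctIntegers_oops nums (countDistinctIntegers_oops nums)

-- ===== LEMMAS AND PROOFS =====

lemma pyReverse_aux : ∀ (k : Nat) (i a : Int), 0 ≤ i → i.toNat ≤ k →
    pyReverse i a = a + digitsumB i := by
  intro k
  induction k with
  | zero =>
    intro i a h0 hle
    have hi : i = 0 := by omega
    subst hi
    rw [pyReverse, digitsumB]; simp
  | succ k ih =>
    intro i a h0 hle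
    by_cases hi : i = 0
    · subst hi; rw [pyReverse, digitsumB]; simp
    · have hpos : 0 < i := by omega
      rw [pyReverse, digitsumB]
      simp only [if_neg hi, if_neg (by omega : ¬ i < 0)]
      have hdiv : PySem.Int.floordiv i 10 = i / 10 :=
        Int.fdiv_eq_ediv_of_nonneg _ (by norm_num)
      rw [hdiv, ih (i / 10) _ (by omega) (by omega)]
      ring

lemma pyReverse_eq_digitsumB (i : Int) : pyReverse i 0 = digitsumB i := by
  by_cases h0 : i < 0
  · rw [pyReverse, digitsumB]
    simp [if_neg (show ¬ i = 0 by omega), if_pos h0]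
  · have := pyReverse_aux i.toNat i 0 (by omega) (le_refl _)
    omega

-- the invariant of A's `account` loop: starting from disjoint nodup (many, once),
-- membership of the final state is determined by the initial sets and counts in L
lemma account_inv (L : List Int) (m o : PySem.Set Int)
    (hm : m.Nodup) (ho : o.Nodup) (hd : ∀ v, v ∈ m → v ∉ o) :
    (L.foldl accountStep (m, o)).1.Nodup ∧
    (L.foldl accountStep (m, o)).2.Nodup ∧
    (∀ v, v ∈ (L.foldl accountStep (m, o)).1 → v ∉ (L.foldl accountStep (m, o)).2) ∧
    (∀ v, v ∈ (L.foldl accountStep (m, o)).2 ↔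
      (v ∈ o ∧ v ∉ L) ∨ (v ∉ m ∧ v ∉ o ∧ L.count v = 1)) ∧
    (∀ v, v ∈ (L.foldl accountStep (m, o)).1 ↔
      v ∈ m ∨ (v ∈ o ∧ v ∈ L) ∨ (v ∉ m ∧ v ∉ o ∧ 2 ≤ L.count v)) := by
  induction L generalizing m o with
  | nil =>
    refine ⟨hm, ho, hd, ?_, ?_⟩ <;> intro v <;> simp
  | cons x rest ih =>
    simp only [List.foldl_cons]
    by_cases hxm : x ∈ m
    · have hstep : accountStep (m, o) x = (m, o) := by
        simp [accountStep, hxm]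
      rw [hstep]
      have hxno : x ∉ o := hd x hxm
      obtain ⟨N1, N2, DJ, HO, HM⟩ := ih m o hm ho hd
      refine ⟨N1, N2, DJ, ?_, ?_⟩
      · intro v
        rw [HO v]
        by_cases hvx : v = x
        · subst hvx; simp [hxm, hxno]
        · have hxv : ¬ x = v := fun h => hvx h.symm
          simp [List.mem_cons, List.count_cons, hvx, hxv]
      · intro v
        rw [HM v]
        by_cases hvx : v = x
        · subst hvx; simp [hxm]
        · have hxv : ¬ x = v := fun h => hvx h.symm
          simp [List.mem_cons, List.count_cons, hvx, hxv]
    · by_cases hxo : x ∈ o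
      · have hstep : accountStep (m, o) x = (PySem.Set.add m x, PySem.Set.discard o x) := by
          simp [accountStep, hxm, hxo]
        rw [hstep]
        have hm' : (PySem.Set.add m x).Nodup := PySem.Set.nodup_add _ _ hm
        have ho' : (PySem.Set.discard o x).Nodup := PySem.Set.nodup_discard _ _ ho
        have hd' : ∀ v, v ∈ PySem.Set.add m x → v ∉ PySem.Set.discard o x := by
          intro v hv
          rw [PySem.Set.mem_add] at hv
          rw [PySem.Set.mem_discard]
          rcases hv with h | h
          · exact fun hc => hd v h hc.1
          · exact fun hc => hc.2 h
        obtain ⟨N1, N2, DJ, HO, HM⟩ := ih _ _ hm' ho' hd'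
        refine ⟨N1, N2, DJ, ?_, ?_⟩
        · intro v
          rw [HO v]
          simp only [PySem.Set.mem_add, PySem.Set.mem_discard]
          by_cases hvx : v = x
          · subst hvx; simp [hxo]
          · have hxv : ¬ x = v := fun h => hvx h.symm
            simp [List.mem_cons, List.count_cons, hvx, hxv]
        · intro v
          rw [HM v]
          simp only [PySem.Set.mem_add, PySem.Set.mem_discard]
          by_cases hvx : v = x
          · subst hvx; simp [hxo]
          · have hxv : ¬ x = v := fun h => hvx h.symm
            simp [List.mem_cons, List.count_cons, hvx, hxv]
      · have hstep : accountStep (m, o) x = (m, PySem.Set.add o x) := by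
          simp [accountStep, hxm, hxo]
        rw [hstep]
        have ho' : (PySem.Set.add o x).Nodup := PySem.Set.nodup_add _ _ ho
        have hd' : ∀ v, v ∈ m → v ∉ PySem.Set.add o x := by
          intro v hv
          rw [PySem.Set.mem_add]
          rintro (h | h)
          · exact hd v hv h
          · exact hxm (h ▸ hv)
        obtain ⟨N1, N2, DJ, HO, HM⟩ := ih _ _ hm ho' hd'
        refine ⟨N1, N2, DJ, ?_, ?_⟩
        · intro v
          rw [HO v]
          simp only [PySem.Set.mem_add]
          by_cases hvx : v = x
          · subst hvx
            simp [hxo, hxm, List.count_cons_self]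
            exact List.count_eq_zero.symm
          · have hxv : ¬ x = v := fun h => hvx h.symm
            simp [List.mem_cons, List.count_cons, hvx, hxv]
        · intro v
          rw [HM v]
          simp only [PySem.Set.mem_add]
          by_cases hvx : v = x
          · subst hvx
            simp [hxo, hxm, List.count_cons_self]
          · have hxv : ¬ x = v := fun h => hvx h.symm
            simp [List.mem_cons, List.count_cons, hvx, hxv]

-- the two ports agree on every input
lemma ports_eq (nums : List Int) :
    countDistinctIntegers_oops nums = countDistinctIntegers_oops_alt nums := by
  classical
  -- pass 1 of A: once = count-1 values, many = count-≥2 values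
  obtain ⟨hmN, hoN, hdj, hO0, hM0⟩ :=
    account_inv nums PySem.Set.empty PySem.Set.empty (by simp [PySem.Set.empty])
      (by simp [PySem.Set.empty]) (by simp [PySem.Set.empty])
  set st1 := nums.foldl accountStep (PySem.Set.empty, PySem.Set.empty) with hst1
  have hOnce : ∀ v, v ∈ st1.2 ↔ nums.count v = 1 := by
    intro v; rw [hO0 v]; simp [PySem.Set.empty]
  have hMany : ∀ v, v ∈ st1.1 ↔ 2 ≤ nums.count v := by
    intro v; rw [hM0 v]; simp [PySem.Set.empty]
  -- B's `once` list
  set O := ((PySem.Dict.counter nums).keys.filter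
      (fun n => (PySem.Dict.counter nums).getD n 0 == 1)) with hOdef
  have hOmem : ∀ v, v ∈ O ↔ nums.count v = 1 := by
    intro v
    rw [hOdef, List.mem_filter]
    rw [PySem.Dict.keys_counter, PySem.Set.mem_ofList, PySem.Dict.getD_counter, beq_iff_eq]
    constructor
    · rintro ⟨-, h⟩; omega
    · intro h; exact ⟨List.count_pos_iff.mp (by omega), by omega⟩
  have hOnodup : O.Nodup := by
    rw [hOdef, PySem.Dict.keys_counter]
    exact (PySem.Set.nodup_ofList nums).filter _
  have hperm : st1.2.Perm O :=
    (List.perm_ext_iff_of_nodup hoN hOnodup).2 (fun v => by rw [hOnce v, hOmem v])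
  -- the mapped lists are permutations of each other
  set LA := st1.2.map (fun n => pyReverse n 0) with hLAdef
  set LB := O.map digitsumB with hLBdef
  have hpermL : LA.Perm LB := by
    rw [hLAdef, hLBdef]
    have : st1.2.map (fun n => pyReverse n 0) = st1.2.map digitsumB := by
      simp only [pyReverse_eq_digitsumB]
    rw [this]
    exact hperm.map digitsumB
  have hcnt : ∀ v, LA.count v = LB.count v := fun v => hpermL.count_eq v
  have hmemL : ∀ v, (v ∈ LA) ↔ (v ∈ LB) := fun v => hpermL.mem_iff
  -- pass 2 of A over LA
  obtain ⟨-, hSN, -, hS, -⟩ := account_inv LA st1.1 st1.2 hmN hoN hdj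
  have hSmem : ∀ v, v ∈ (LA.foldl accountStep (st1.1, st1.2)).2 ↔
      ((nums.count v = 1 ∧ v ∉ LB) ∨ (nums.count v = 0 ∧ LB.count v = 1)) := by
    intro v
    rw [hS v, show (v ∈ st1.2) = (nums.count v = 1) from propext (hOnce v),
        show (v ∈ st1.1) = (2 ≤ nums.count v) from propext (hMany v),
        show (v ∈ LA) = (v ∈ LB) from propext (hmemL v), hcnt v]
    constructor
    · rintro (⟨h1, h2⟩ | ⟨h1, h2, h3⟩)
      · exact Or.inl ⟨h1, h2⟩
      · exact Or.inr ⟨by omega, h3⟩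
    · rintro (⟨h1, h2⟩ | ⟨h1, h2⟩)
      · exact Or.inl ⟨h1, h2⟩
      · exact Or.inr ⟨by omega, by omega, h2⟩
  -- B's two filtered lists
  set stayL := O.filter (fun n => (PySem.Dict.counter LB).getD n 0 == 0) with hstayDef
  set freshL := (PySem.Dict.counter LB).keys.filter
      (fun r => (PySem.Dict.counter LB).getD r 0 == 1 &&
        !((PySem.Dict.counter nums).contains r)) with hfreshDef
  have hstay : ∀ v, v ∈ stayL ↔ (nums.count v = 1 ∧ v ∉ LB) := by
    intro v
    rw [hstayDef, List.mem_filter, show (v ∈ O) = (nums.count v = 1) from propext (hOmem v),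
        PySem.Dict.getD_counter, beq_iff_eq]
    constructor
    · rintro ⟨h1, h2⟩; exact ⟨h1, List.count_eq_zero.mp (by omega)⟩
    · rintro ⟨h1, h2⟩; exact ⟨h1, by rw [List.count_eq_zero.mpr h2]; rfl⟩
  have hfresh : ∀ v, v ∈ freshL ↔ (nums.count v = 0 ∧ LB.count v = 1) := by
    intro v
    rw [hfreshDef, List.mem_filter, PySem.Dict.keys_counter, PySem.Set.mem_ofList]
    simp only [PySem.Dict.getD_counter, PySem.Dict.contains_counter, Bool.and_eq_true,
      beq_iff_eq, Bool.not_eq_eq_eq_not, Bool.not_true, List.contains_eq_mem,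
      decide_eq_false_iff_not]
    constructor
    · rintro ⟨-, h1, h2⟩
      exact ⟨List.count_eq_zero.mpr h2, by omega⟩
    · rintro ⟨h1, h2⟩
      refine ⟨List.count_pos_iff.mp (by omega), by omega, List.count_eq_zero.mp h1⟩
  have hsN : stayL.Nodup := hOnodup.filter _
  have hfN : freshL.Nodup := by
    rw [hfreshDef, PySem.Dict.keys_counter]
    exact (PySem.Set.nodup_ofList LB).filter _
  have hTN : (stayL ++ freshL).Nodup := by
    refine hsN.append hfN ?_
    intro v hv1 hv2
    have h1 := (hstay v).mp hv1
    have h2 := (hfresh v).mp hv2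
    omega
  have hfinal : (LA.foldl accountStep (st1.1, st1.2)).2.Perm (stayL ++ freshL) := by
    refine (List.perm_ext_iff_of_nodup hSN hTN).2 ?_
    intro v
    rw [hSmem v, List.mem_append, hstay v, hfresh v]
  have hlen := hfinal.length_eq
  rw [List.length_append] at hlen
  -- assemble
  show PySem.Set.len (LA.foldl accountStep (st1.1, st1.2)).2 =
      ((stayL.length : Int) + (freshL.length : Int))
  rw [PySem.Set.len, hlen]
  push_cast
  ring

-- ===== VERDICT (by name: the statement is the Claim_ definition above) =====
theorem countDistinctIntegers_oops_spec : Claim_equal_countDistinctIntegers_oops := by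
  intro nums _hdom
  unfold Spec_countDistinctIntegers_oops
  exact ports_eq nums
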